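-- pv_equiv track=rewrite | github.com/vaibhavdhonde/fake-news-detection- | fakeNews.py | detect_fake_news
-- ===== SOURCE A (Python) =====
-- def detect_fake_news(text):
--     keywords = list(set([
--         "Hoax", "Fake", "Unreliable", "Unconfirmed", "Satire", "Misleading", "Sensational", "Clickbait", "Manipulated",
--         "Propaganda", "Fabricated", "Conspiracy", "Rumor", "Exaggerated", "Deceptive", "Biased", "Scam", "Distorted",
--         "Dubious", "Unsubstantiated", "Fraudulent", "Speculative", "Questionable", "Falsehood", "Disinformation",
--         "Inaccurate", "Fictitious", "Phony", "Bogus", "Fabrication", "Fallacious", "Illusory", "Inauthentic",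
--         "Untrustworthy", "Pseudo", "Unverified", "Unreal", "Counterfeit", "Delusive", "Deceitful", "Preposterous",
--         "Ambiguous", "Devious", "Fallacy", "Illusive", "Insidious", "Perjury", "Sham", "Slander", "Subterfuge",
--         "Opinion Disguised as Fact", "unverified", "dubious", "speculative", "sensational", "misleading", "biased",
--         "rumour", "conspiracy", "propaganda", "manipulation", "fabricated", "exaggerated", "unsubstantiated",
--         "baseless","falsehood", "unreliable", "prejudiced", "hyperbolic", "opinion disguised as fact", "controversial",
--         "selective reporting", "divisive", "nationalistic bias", "ethnic tensions", "communal disharmony",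
--         "misinformation","fabricated quotes", "polarizing", "concocted stories", "yellow journalism", "fake claims", "censorship claims",
--         "satirical content", "urban legends", "ethnic stereotyping", "hoax", "fabricated", "misleading", "unverified",
--         "debunked", "fictitious", "sensational", "conspiracy", "misinformation", "discredited", "propaganda",
--         "deceitful","biased", "manipulation", "false", "unfounded", "distorted", "sensationalism", "unreliable", "clickbait",
--         "pseudoscience", "unsubstantiated", "rumor", "partisan", "conspiracy theory", "manipulated", "counterfeit",
--         "fraudulent", "distorted", "baseless", "exaggerated", "insidious", "uncorroborated", "sensationalized",
--         "speculative", "dubious", "fallacious", "unauthenticated", "counterfeit", "specious", "hyperbolic", "concocted", "prejudiced",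
--         "deceptive", "spurious", "fallacy", "misinformation", "misleading", "false premise", "disinformation",
--         "rumor mill", "deceit", "unreliable source", "misleading headline", "fraudulent claim", "unscrupulous", "erroneous",
--         "unconfirmed","distorted facts", "truth distortion", "innuendo", "clickbait headline", "rumor mongering",
--         "manipulated content", "contrived", "deceitful narrative", "sensationalist reporting", "contrived story", "deceptive tactics", "spin",
--         "false narrative", "fiction", "unreliable information", "sensational reporting", "falsified evidence",
--         "partial truth","partisan agenda", "rumor spreading", "deceptive framing", "biased reporting", "false attribution",
--         "cherry-picked data","staged event", "misleading visuals", "hyper-partisan", "agenda-driven", "deceptive statistics",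
--         "false context","unverified source", "manipulated data", "selective quoting", "data distortion", "context manipulation",
--         "opinion disguised as fact", "agenda-driven reporting", "cherry-picked quotes", "selective reporting",
--         "manufactured controversy" ]))
--     for keyword in keywords:
--         if keyword.lower() in text.lower():
--             return True
--     return False
-- ===== SOURCE B (Python) =====
-- # B: A's 184 mixed-case keywords reduce, after lowercasing and deduplication, to the
-- # 94 minimal keywords below (every dropped keyword contains one of these as a substring,
-- # so dropping it cannot change whether some keyword occurs in the text).  Detection is a
-- # single left-to-right scan of the lowered text, testing each keyword with startswith at
-- # every position, instead of A's per-keyword full substring search.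
-- _KEYWORDS = [
--     'agenda-driven', 'ambiguous', 'baseless', 'biased',
--     'bogus', 'censorship claims', 'cherry-picked data', 'cherry-picked quotes',
--     'clickbait', 'communal disharmony', 'concocted', 'conspiracy',
--     'contrived', 'controversial', 'counterfeit', 'data distortion',
--     'debunked', 'deceit', 'deceptive', 'delusive',
--     'devious', 'discredited', 'disinformation', 'distorted',
--     'divisive', 'dubious', 'erroneous', 'ethnic stereotyping',
--     'ethnic tensions', 'exaggerated', 'fabricated', 'fabrication',
--     'fake', 'fallacious', 'fallacy', 'false',
--     'falsified evidence', 'fiction', 'fictitious', 'fraudulent',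
--     'hoax', 'hyperbolic', 'illusive', 'illusory',
--     'inaccurate', 'inauthentic', 'innuendo', 'insidious',
--     'manipulated', 'manipulation', 'manufactured controversy', 'misinformation',
--     'misleading', 'nationalistic bias', 'opinion disguised as fact', 'partial truth',
--     'partisan', 'perjury', 'phony', 'polarizing',
--     'prejudiced', 'preposterous', 'propaganda', 'pseudo',
--     'questionable', 'rumor', 'rumour', 'satire',
--     'satirical content', 'scam', 'selective quoting', 'selective reporting',
--     'sensational', 'sham', 'slander', 'specious',
--     'speculative', 'spin', 'spurious', 'staged event',
--     'subterfuge', 'truth distortion', 'unauthenticated', 'unconfirmed',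
--     'uncorroborated', 'unfounded', 'unreal', 'unreliable',
--     'unscrupulous', 'unsubstantiated', 'untrustworthy', 'unverified',
--     'urban legends', 'yellow journalism',
-- ]
--
--
-- def detect_fake_news(text):
--     t = text.lower()
--     for i in range(len(t)):
--         for kw in _KEYWORDS:
--             if t.startswith(kw, i):
--                 return True
--     return False
-- ===== Notes on version B (the rewrite author's own statement) =====
-- stated objective: alternative
-- what changed: A loops over the deduplicated keyword set and runs a full substring search of the re-lowered text for each of its 184 mixed-case keywords; B precomputes the 94 minimal lowercase keywords (dropping every keyword that contains another one as a substring, which cannot change the answer) and makes a single left-to-right scan of the lowered text, testing each minimal keyword with startswith at each position.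
import Mathlib
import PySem

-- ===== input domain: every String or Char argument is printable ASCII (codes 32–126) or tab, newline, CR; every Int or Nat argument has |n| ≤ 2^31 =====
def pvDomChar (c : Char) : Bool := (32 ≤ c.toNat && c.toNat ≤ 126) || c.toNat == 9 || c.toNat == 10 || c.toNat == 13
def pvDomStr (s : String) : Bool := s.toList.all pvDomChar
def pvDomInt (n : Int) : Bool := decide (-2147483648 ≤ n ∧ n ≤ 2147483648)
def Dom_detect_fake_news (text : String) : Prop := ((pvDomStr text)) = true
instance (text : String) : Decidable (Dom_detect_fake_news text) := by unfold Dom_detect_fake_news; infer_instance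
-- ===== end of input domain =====

-- B keeps only the 94 minimal lowercase keywords (dropping every keyword containing
-- another as a substring, which cannot change the answer) and scans the lowered text
-- position by position with startswith, instead of A's per-keyword full substring
-- search over the 184 mixed-case keywords (objective: alternative algorithm, same result).

-- ===== PORT A =====
-- A's local keyword list literal.
def pvKeywordsA : List String := [
    "Hoax", "Fake", "Unreliable", "Unconfirmed", "Satire",
    "Misleading", "Sensational", "Clickbait", "Manipulated", "Propaganda",
    "Fabricated", "Conspiracy", "Rumor", "Exaggerated", "Deceptive",
    "Biased", "Scam", "Distorted", "Dubious", "Unsubstantiated",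
    "Fraudulent", "Speculative", "Questionable", "Falsehood", "Disinformation",
    "Inaccurate", "Fictitious", "Phony", "Bogus", "Fabrication",
    "Fallacious", "Illusory", "Inauthentic", "Untrustworthy", "Pseudo",
    "Unverified", "Unreal", "Counterfeit", "Delusive", "Deceitful",
    "Preposterous", "Ambiguous", "Devious", "Fallacy", "Illusive",
    "Insidious", "Perjury", "Sham", "Slander", "Subterfuge",
    "Opinion Disguised as Fact", "unverified", "dubious", "speculative", "sensational",
    "misleading", "biased", "rumour", "conspiracy", "propaganda",
    "manipulation", "fabricated", "exaggerated", "unsubstantiated", "baseless",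
    "falsehood", "unreliable", "prejudiced", "hyperbolic", "opinion disguised as fact",
    "controversial", "selective reporting", "divisive", "nationalistic bias", "ethnic tensions",
    "communal disharmony", "misinformation", "fabricated quotes", "polarizing", "concocted stories",
    "yellow journalism", "fake claims", "censorship claims", "satirical content", "urban legends",
    "ethnic stereotyping", "hoax", "fabricated", "misleading", "unverified",
    "debunked", "fictitious", "sensational", "conspiracy", "misinformation",
    "discredited", "propaganda", "deceitful", "biased", "manipulation",
    "false", "unfounded", "distorted", "sensationalism", "unreliable",
    "clickbait", "pseudoscience", "unsubstantiated", "rumor", "partisan",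
    "conspiracy theory", "manipulated", "counterfeit", "fraudulent", "distorted",
    "baseless", "exaggerated", "insidious", "uncorroborated", "sensationalized",
    "speculative", "dubious", "fallacious", "unauthenticated", "counterfeit",
    "specious", "hyperbolic", "concocted", "prejudiced", "deceptive",
    "spurious", "fallacy", "misinformation", "misleading", "false premise",
    "disinformation", "rumor mill", "deceit", "unreliable source", "misleading headline",
    "fraudulent claim", "unscrupulous", "erroneous", "unconfirmed", "distorted facts",
    "truth distortion", "innuendo", "clickbait headline", "rumor mongering", "manipulated content",
    "contrived", "deceitful narrative", "sensationalist reporting", "contrived story", "deceptive tactics",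
    "spin", "false narrative", "fiction", "unreliable information", "sensational reporting",
    "falsified evidence", "partial truth", "partisan agenda", "rumor spreading", "deceptive framing",
    "biased reporting", "false attribution", "cherry-picked data", "staged event", "misleading visuals",
    "hyper-partisan", "agenda-driven", "deceptive statistics", "false context", "unverified source",
    "manipulated data", "selective quoting", "data distortion", "context manipulation", "opinion disguised as fact",
    "agenda-driven reporting", "cherry-picked quotes", "selective reporting", "manufactured controversy"
]

-- for keyword in list(set(keywords)): if keyword.lower() in text.lower(): return True / return False
def pvLoopA : List String → String → Bool
  | [], _ => false
  | kw :: rest, text =>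
    if PySem.Str.isIn (PySem.Str.lower kw) (PySem.Str.lower text) then true
    else pvLoopA rest text

def detect_fake_news (text : String) : Bool :=
  pvLoopA (PySem.Set.ofList pvKeywordsA) text

-- ===== PORT B =====
-- module level: _KEYWORDS = [ the 94 minimal lowercase keywords ]
def pvKeywordsB : List String := [
    "agenda-driven", "ambiguous", "baseless", "biased", "bogus",
    "censorship claims", "cherry-picked data", "cherry-picked quotes", "clickbait", "communal disharmony",
    "concocted", "conspiracy", "contrived", "controversial", "counterfeit",
    "data distortion", "debunked", "deceit", "deceptive", "delusive",
    "devious", "discredited", "disinformation", "distorted", "divisive",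
    "dubious", "erroneous", "ethnic stereotyping", "ethnic tensions", "exaggerated",
    "fabricated", "fabrication", "fake", "fallacious", "fallacy",
    "false", "falsified evidence", "fiction", "fictitious", "fraudulent",
    "hoax", "hyperbolic", "illusive", "illusory", "inaccurate",
    "inauthentic", "innuendo", "insidious", "manipulated", "manipulation",
    "manufactured controversy", "misinformation", "misleading", "nationalistic bias", "opinion disguised as fact",
    "partial truth", "partisan", "perjury", "phony", "polarizing",
    "prejudiced", "preposterous", "propaganda", "pseudo", "questionable",
    "rumor", "rumour", "satire", "satirical content", "scam",
    "selective quoting", "selective reporting", "sensational", "sham", "slander",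
    "specious", "speculative", "spin", "spurious", "staged event",
    "subterfuge", "truth distortion", "unauthenticated", "unconfirmed", "uncorroborated",
    "unfounded", "unreal", "unreliable", "unscrupulous", "unsubstantiated",
    "untrustworthy", "unverified", "urban legends", "yellow journalism"
]

-- inner loop: for kw in _KEYWORDS: if t.startswith(kw, i): return True
-- (t.startswith(kw, i) with 0 ≤ i ≤ len t is startswith on t.drop i.toNat — exact here)
def pvInnerB (t : List Char) (i : Nat) : List String → Bool
  | [] => false
  | kw :: rest =>
    if PySem.Chars.startswith (t.drop i) kw.toList then true else pvInnerB t i rest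

-- outer loop: for i in range(len(t)): … / return False
def pvScanB (t : List Char) : List Int → Bool
  | [] => false
  | i :: rest =>
    if pvInnerB t i.toNat pvKeywordsB then true else pvScanB t rest

def detect_fake_news_alt (text : String) : Bool :=
  let t := (PySem.Str.lower text).toList
  pvScanB t (PySem.List.pyRange 0 t.length 1)

-- ===== PRECONDITION & SPEC =====
def Spec_detect_fake_news (text : String) (out : Bool) : Prop := out = detect_fake_news_alt text
instance (text : String) (out : Bool) : Decidable (Spec_detect_fake_news text out) := by unfold Spec_detect_fake_news; infer_instance

-- ===== CLAIM (what is proved, stated in full; the proofs are below) =====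
def Claim_equal_detect_fake_news : Prop := ∀ (text : String), Dom_detect_fake_news text → Spec_detect_fake_news text (detect_fake_news text)

-- ===== LEMMAS AND PROOFS =====

-- each lowered A keyword paired with the minimal keyword it contains (its cover)
def pvPairs : List (String × String) := [
    ("hoax", "hoax"), ("fake", "fake"), ("unreliable", "unreliable"),
    ("unconfirmed", "unconfirmed"), ("satire", "satire"), ("misleading", "misleading"),
    ("sensational", "sensational"), ("clickbait", "clickbait"), ("manipulated", "manipulated"),
    ("propaganda", "propaganda"), ("fabricated", "fabricated"), ("conspiracy", "conspiracy"),
    ("rumor", "rumor"), ("exaggerated", "exaggerated"), ("deceptive", "deceptive"),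
    ("biased", "biased"), ("scam", "scam"), ("distorted", "distorted"),
    ("dubious", "dubious"), ("unsubstantiated", "unsubstantiated"), ("fraudulent", "fraudulent"),
    ("speculative", "speculative"), ("questionable", "questionable"), ("falsehood", "false"),
    ("disinformation", "disinformation"), ("inaccurate", "inaccurate"), ("fictitious", "fictitious"),
    ("phony", "phony"), ("bogus", "bogus"), ("fabrication", "fabrication"),
    ("fallacious", "fallacious"), ("illusory", "illusory"), ("inauthentic", "inauthentic"),
    ("untrustworthy", "untrustworthy"), ("pseudo", "pseudo"), ("unverified", "unverified"),
    ("unreal", "unreal"), ("counterfeit", "counterfeit"), ("delusive", "delusive"),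
    ("deceitful", "deceit"), ("preposterous", "preposterous"), ("ambiguous", "ambiguous"),
    ("devious", "devious"), ("fallacy", "fallacy"), ("illusive", "illusive"),
    ("insidious", "insidious"), ("perjury", "perjury"), ("sham", "sham"),
    ("slander", "slander"), ("subterfuge", "subterfuge"), ("opinion disguised as fact", "opinion disguised as fact"),
    ("unverified", "unverified"), ("dubious", "dubious"), ("speculative", "speculative"),
    ("sensational", "sensational"), ("misleading", "misleading"), ("biased", "biased"),
    ("rumour", "rumour"), ("conspiracy", "conspiracy"), ("propaganda", "propaganda"),
    ("manipulation", "manipulation"), ("fabricated", "fabricated"), ("exaggerated", "exaggerated"),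
    ("unsubstantiated", "unsubstantiated"), ("baseless", "baseless"), ("falsehood", "false"),
    ("unreliable", "unreliable"), ("prejudiced", "prejudiced"), ("hyperbolic", "hyperbolic"),
    ("opinion disguised as fact", "opinion disguised as fact"), ("controversial", "controversial"), ("selective reporting", "selective reporting"),
    ("divisive", "divisive"), ("nationalistic bias", "nationalistic bias"), ("ethnic tensions", "ethnic tensions"),
    ("communal disharmony", "communal disharmony"), ("misinformation", "misinformation"), ("fabricated quotes", "fabricated"),
    ("polarizing", "polarizing"), ("concocted stories", "concocted"), ("yellow journalism", "yellow journalism"),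
    ("fake claims", "fake"), ("censorship claims", "censorship claims"), ("satirical content", "satirical content"),
    ("urban legends", "urban legends"), ("ethnic stereotyping", "ethnic stereotyping"), ("hoax", "hoax"),
    ("fabricated", "fabricated"), ("misleading", "misleading"), ("unverified", "unverified"),
    ("debunked", "debunked"), ("fictitious", "fictitious"), ("sensational", "sensational"),
    ("conspiracy", "conspiracy"), ("misinformation", "misinformation"), ("discredited", "discredited"),
    ("propaganda", "propaganda"), ("deceitful", "deceit"), ("biased", "biased"),
    ("manipulation", "manipulation"), ("false", "false"), ("unfounded", "unfounded"),
    ("distorted", "distorted"), ("sensationalism", "sensational"), ("unreliable", "unreliable"),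
    ("clickbait", "clickbait"), ("pseudoscience", "pseudo"), ("unsubstantiated", "unsubstantiated"),
    ("rumor", "rumor"), ("partisan", "partisan"), ("conspiracy theory", "conspiracy"),
    ("manipulated", "manipulated"), ("counterfeit", "counterfeit"), ("fraudulent", "fraudulent"),
    ("distorted", "distorted"), ("baseless", "baseless"), ("exaggerated", "exaggerated"),
    ("insidious", "insidious"), ("uncorroborated", "uncorroborated"), ("sensationalized", "sensational"),
    ("speculative", "speculative"), ("dubious", "dubious"), ("fallacious", "fallacious"),
    ("unauthenticated", "unauthenticated"), ("counterfeit", "counterfeit"), ("specious", "specious"),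
    ("hyperbolic", "hyperbolic"), ("concocted", "concocted"), ("prejudiced", "prejudiced"),
    ("deceptive", "deceptive"), ("spurious", "spurious"), ("fallacy", "fallacy"),
    ("misinformation", "misinformation"), ("misleading", "misleading"), ("false premise", "false"),
    ("disinformation", "disinformation"), ("rumor mill", "rumor"), ("deceit", "deceit"),
    ("unreliable source", "unreliable"), ("misleading headline", "misleading"), ("fraudulent claim", "fraudulent"),
    ("unscrupulous", "unscrupulous"), ("erroneous", "erroneous"), ("unconfirmed", "unconfirmed"),
    ("distorted facts", "distorted"), ("truth distortion", "truth distortion"), ("innuendo", "innuendo"),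
    ("clickbait headline", "clickbait"), ("rumor mongering", "rumor"), ("manipulated content", "manipulated"),
    ("contrived", "contrived"), ("deceitful narrative", "deceit"), ("sensationalist reporting", "sensational"),
    ("contrived story", "contrived"), ("deceptive tactics", "deceptive"), ("spin", "spin"),
    ("false narrative", "false"), ("fiction", "fiction"), ("unreliable information", "unreliable"),
    ("sensational reporting", "sensational"), ("falsified evidence", "falsified evidence"), ("partial truth", "partial truth"),
    ("partisan agenda", "partisan"), ("rumor spreading", "rumor"), ("deceptive framing", "deceptive"),
    ("biased reporting", "biased"), ("false attribution", "false"), ("cherry-picked data", "cherry-picked data"),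
    ("staged event", "staged event"), ("misleading visuals", "misleading"), ("hyper-partisan", "partisan"),
    ("agenda-driven", "agenda-driven"), ("deceptive statistics", "deceptive"), ("false context", "false"),
    ("unverified source", "unverified"), ("manipulated data", "manipulated"), ("selective quoting", "selective quoting"),
    ("data distortion", "data distortion"), ("context manipulation", "manipulation"), ("opinion disguised as fact", "opinion disguised as fact"),
    ("agenda-driven reporting", "agenda-driven"), ("cherry-picked quotes", "cherry-picked quotes"), ("selective reporting", "selective reporting"),
    ("manufactured controversy", "manufactured controversy")
]

theorem pvLoopA_any (l : List String) (text : String) :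
    pvLoopA l text = l.any (fun kw => PySem.Str.isIn (PySem.Str.lower kw) (PySem.Str.lower text)) := by
  induction l with
  | nil => rfl
  | cons kw rest ih =>
    simp [pvLoopA, ih]

theorem pvInnerB_any (t : List Char) (i : Nat) (l : List String) :
    pvInnerB t i l = l.any (fun kw => PySem.Chars.startswith (t.drop i) kw.toList) := by
  induction l with
  | nil => rfl
  | cons kw rest ih =>
    simp [pvInnerB, ih]

theorem pvScanB_any (t : List Char) (l : List Int) :
    pvScanB t l = l.any (fun i => pvInnerB t i.toNat pvKeywordsB) := by
  induction l with
  | nil => rfl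
  | cons i rest ih =>
    simp [pvScanB, ih]

-- lowering A's keywords gives exactly the first components of pvPairs
set_option maxHeartbeats 16000000 in
set_option maxRecDepth 100000 in
theorem pvPairs_fst : pvKeywordsA.map PySem.Str.lower = pvPairs.map Prod.fst := by decide

-- each pair's cover is a B keyword and a substring of the lowered A keyword
set_option maxHeartbeats 16000000 in
set_option maxRecDepth 100000 in
theorem pvPairs_cover :
    pvPairs.all (fun p => pvKeywordsB.contains p.2 && PySem.Str.isIn p.2 p.1) = true := by decide

-- every B keyword is one of the lowered A keywords
set_option maxHeartbeats 16000000 in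
set_option maxRecDepth 100000 in
theorem pvBA_sub : pvKeywordsB.all (fun k2 => (pvPairs.map Prod.fst).contains k2) = true := by decide

theorem pvB_nonempty : pvKeywordsB.all (fun kw => !kw.toList.isEmpty) = true := by decide

theorem pv_main (text : String) : detect_fake_news text = detect_fake_news_alt text := by
  rw [Bool.eq_iff_iff]
  rw [detect_fake_news, detect_fake_news_alt, pvLoopA_any, List.any_eq_true, pvScanB_any,
      List.any_eq_true]
  constructor
  · rintro ⟨kw, hmem, hin⟩
    rw [PySem.Set.mem_ofList] at hmem
    have hfst : PySem.Str.lower kw ∈ pvPairs.map Prod.fst := by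
      rw [← pvPairs_fst]; exact List.mem_map_of_mem hmem
    obtain ⟨p, hp, hp1⟩ := List.mem_map.mp hfst
    have hcov := List.all_eq_true.mp pvPairs_cover p hp
    rw [Bool.and_eq_true] at hcov
    obtain ⟨hpB, hpin⟩ := hcov
    have hpB' : p.2 ∈ pvKeywordsB := by
      rw [← List.contains_iff_mem]; exact hpB
    -- p.2 is an infix of the lowered keyword, which is an infix of the lowered text
    rw [PySem.Str.isIn_iff_infix] at hin hpin
    rw [hp1] at hpin
    have hinf : p.2.toList <:+: (PySem.Str.lower text).toList := hpin.trans hin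
    rw [← PySem.Chars.isIn_iff_infix, ← PySem.Chars.exists_prefix_drop_iff_isIn] at hinf
    obtain ⟨j, hj⟩ := hinf
    have hne : p.2.toList ≠ [] := by
      have := List.all_eq_true.mp pvB_nonempty _ hpB'
      simpa using this
    have hjlt : j < (PySem.Str.lower text).toList.length := by
      have h1 := hj.length_le
      have h2 : 0 < p.2.toList.length := List.length_pos_iff.mpr hne
      rw [List.length_drop] at h1
      omega
    refine ⟨(j : Int), ?_, ?_⟩
    · rw [PySem.List.mem_pyRange_one]
      exact ⟨Int.natCast_nonneg j, by exact_mod_cast hjlt⟩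
    · rw [Int.toNat_natCast, pvInnerB_any, List.any_eq_true]
      exact ⟨p.2, hpB', (PySem.Chars.startswith_iff _ _).mpr hj⟩
  · rintro ⟨i, hi, hinner⟩
    rw [pvInnerB_any, List.any_eq_true] at hinner
    obtain ⟨k2, hk2, hsw⟩ := hinner
    have := List.all_eq_true.mp pvBA_sub k2 hk2
    rw [List.contains_iff_mem, ← pvPairs_fst, List.mem_map] at this
    obtain ⟨kw, hmem, hlow⟩ := this
    refine ⟨kw, (PySem.Set.mem_ofList _ _).mpr hmem, ?_⟩
    rw [PySem.Str.isIn_iff_infix, ← PySem.Chars.isIn_iff_infix,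
        ← PySem.Chars.exists_prefix_drop_iff_isIn]
    refine ⟨i.toNat, ?_⟩
    have : k2.toList = (PySem.Str.lower kw).toList := by rw [hlow]
    rw [← this]
    exact (PySem.Chars.startswith_iff _ _).mp hsw

-- ===== VERDICT (by name: the statement is the Claim_ definition above) =====
theorem detect_fake_news_spec : Claim_equal_detect_fake_news := by
  intro text _
  unfold Spec_detect_fake_news
  exact pv_main text
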